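-- pv_equiv track=rewrite | github.com/Alpha0117/Sorting-Methods | sorting_algorithms.py | red_sort
-- ===== SOURCE A (Python) =====
-- def red_sort(arr):
--     steps = []
--
--     def swap(i, j):
--         arr[i], arr[j] = arr[j], arr[i]
--         steps.append(list(arr))
--
--     def partition(arr, low, high):
--         pivot = arr[high]
--         i = low - 1
--         for j in range(low, high):
--             if arr[j] <= pivot:
--                 i += 1
--                 swap(i, j)
--         swap(i + 1, high)
--         return i + 1
--
--     def red_quick_sort(arr, low, high):
--         if low < high:
--             pi = partition(arr, low, high)
--             red_quick_sort(arr, low, pi - 1)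
--             red_quick_sort(arr, pi + 1, high)
--
--     red_quick_sort(arr, 0, len(arr) - 1)
--     return arr, steps
-- ===== SOURCE B (Python) =====
-- def red_sort(arr):
--     # Pass 1: compute the exact swap-index sequence of Lomuto quicksort
--     # on a scratch copy, driven by an explicit stack instead of recursion.
--     def partition(a, low, high, ops):
--         pivot = a[high]
--         i = low - 1
--         for j in range(low, high):
--             if a[j] <= pivot:
--                 i += 1
--                 a[i], a[j] = a[j], a[i]
--                 ops.append((i, j))
--         a[i + 1], a[high] = a[high], a[i + 1]
--         ops.append((i + 1, high))
--         return i + 1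
--
--     work = list(arr)
--     ops = []
--     stack = [(0, len(arr) - 1)]
--     while stack:
--         low, high = stack.pop()
--         if low < high:
--             pi = partition(work, low, high, ops)
--             stack.append((pi + 1, high))
--             stack.append((low, pi - 1))
--
--     # Pass 2: replay the swaps on arr, snapshotting after each swap.
--     steps = []
--     for i, j in ops:
--         arr[i], arr[j] = arr[j], arr[i]
--         steps.append(list(arr))
--     return arr, steps
-- ===== Notes on version B (the rewrite author's own statement) =====
-- stated objective: alternative
-- what changed: B is split into two staged passes: an explicit-stack (non-recursive) quicksort on a scratch copy that only records the sequence of swap index pairs, followed by a replay pass that applies those swaps to the input and takes a snapshot after each; A recursively sorts while snapshotting inline.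
import Mathlib
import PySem

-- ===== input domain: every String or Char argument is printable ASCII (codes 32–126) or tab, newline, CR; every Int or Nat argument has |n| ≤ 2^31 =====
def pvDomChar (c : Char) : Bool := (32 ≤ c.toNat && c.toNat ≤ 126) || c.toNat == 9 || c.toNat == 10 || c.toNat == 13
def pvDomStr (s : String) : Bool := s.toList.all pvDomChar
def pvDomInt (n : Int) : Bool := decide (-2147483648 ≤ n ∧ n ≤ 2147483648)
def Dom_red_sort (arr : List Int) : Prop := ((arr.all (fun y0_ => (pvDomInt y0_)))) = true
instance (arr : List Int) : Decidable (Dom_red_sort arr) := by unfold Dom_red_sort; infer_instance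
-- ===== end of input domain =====

-- B splits the task into two staged passes — an explicit-stack quicksort on a scratch copy that
-- records only the swap index pairs, then a replay pass that applies those swaps and snapshots —
-- where A snapshots inline during a recursive quicksort; objective: alternative decomposition,
-- same cost. Both A and B sort the Python list argument in place; the theorem is about the
-- returned (arr, steps) value.


-- ===== PORT A =====
-- State = (arr, steps).  swap(i, j): indices are always in range when called, so the total
-- forms pyGetD/pySetD are exact here.
def pvSwap (s : List Int × List (List Int)) (i j : Int) : List Int × List (List Int) :=
  let x := PySem.List.pyGetD s.1 j 0        -- arr[j]
  let y := PySem.List.pyGetD s.1 i 0        -- arr[i]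
  let a' := PySem.List.pySetD (PySem.List.pySetD s.1 i x) j y
  (a', s.2 ++ [a'])

-- one iteration of partition's for-loop body (state = (i, (arr, steps)))
def pvPartStep (pivot : Int) (st : Int × (List Int × List (List Int))) (j : Int) :
    Int × (List Int × List (List Int)) :=
  if PySem.List.pyGetD st.2.1 j 0 ≤ pivot then (st.1 + 1, pvSwap st.2 (st.1 + 1) j) else st

def pvPartition (low high : Int) (s : List Int × List (List Int)) :
    Int × (List Int × List (List Int)) :=
  let pivot := PySem.List.pyGetD s.1 high 0
  let r := (PySem.List.pyRange low high 1).foldl (pvPartStep pivot) (low - 1, s)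
  (r.1 + 1, pvSwap r.2 (r.1 + 1) high)

-- red_quick_sort; the Nat fuel only makes the recursion structural (it is never exhausted:
-- red_sort passes arr.length + 1, which is enough — see qs_fuel_eq below)
def pvQS : Nat → Int → Int → List Int × List (List Int) → List Int × List (List Int)
  | 0, _, _, s => s
  | f + 1, low, high, s =>
    if low < high then
      let p := pvPartition low high s
      pvQS f (p.1 + 1) high (pvQS f low (p.1 - 1) p.2)
    else s

def red_sort (arr : List Int) : List Int × List (List Int) :=
  pvQS (arr.length + 1) 0 ((arr.length : Int) - 1) (arr, [])

-- ===== PORT B =====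
-- applying one recorded swap (i, j) to an array (indices always in range when used)
def pvApply (a : List Int) (p : Int × Int) : List Int :=
  PySem.List.pySetD (PySem.List.pySetD a p.1 (PySem.List.pyGetD a p.2 0)) p.2
    (PySem.List.pyGetD a p.1 0)

-- pass 1, partition's for-loop body on the scratch copy; state = (i, (work, ops))
def pvOpStep (pivot : Int) (st : Int × (List Int × List (Int × Int))) (j : Int) :
    Int × (List Int × List (Int × Int)) :=
  if PySem.List.pyGetD st.2.1 j 0 ≤ pivot then
    (st.1 + 1, (pvApply st.2.1 (st.1 + 1, j), st.2.2 ++ [(st.1 + 1, j)]))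
  else st

def pvOpPartition (low high : Int) (s : List Int × List (Int × Int)) :
    Int × (List Int × List (Int × Int)) :=
  let pivot := PySem.List.pyGetD s.1 high 0
  let r := (PySem.List.pyRange low high 1).foldl (pvOpStep pivot) (low - 1, s)
  (r.1 + 1, (pvApply r.2.1 (r.1 + 1, high), r.2.2 ++ [(r.1 + 1, high)]))

-- pass 1's while-loop over the explicit stack (head = top); fuel is a totality guard only
-- (never exhausted: red_sort_alt passes 2*arr.length + 1, enough — see oploop_eq_foldl below)
def pvOpLoop : Nat → List (Int × Int) → List Int × List (Int × Int) → List Int × List (Int × Int)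
  | _, [], s => s
  | 0, _ :: _, s => s
  | f + 1, (low, high) :: rest, s =>
    if low < high then
      let p := pvOpPartition low high s
      pvOpLoop f ((low, p.1 - 1) :: (p.1 + 1, high) :: rest) p.2
    else pvOpLoop f rest s

-- pass 2: replay the swaps on the original array, snapshotting after each
def pvReplay (a0 : List Int) (ops : List (Int × Int)) : List Int × List (List Int) :=
  ops.foldl (fun s p => (pvApply s.1 p, s.2 ++ [pvApply s.1 p])) (a0, [])

def red_sort_alt (arr : List Int) : List Int × List (List Int) :=
  pvReplay arr (pvOpLoop (2 * arr.length + 1) [(0, (arr.length : Int) - 1)] (arr, [])).2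

-- ===== PRECONDITION & SPEC =====
def Spec_red_sort (arr : List Int) (out : List Int × List (List Int)) : Prop := out = red_sort_alt arr
instance (arr : List Int) (out : List Int × List (List Int)) : Decidable (Spec_red_sort arr out) := by unfold Spec_red_sort; infer_instance

-- ===== CLAIM (what is proved, stated in full; the proofs are below) =====
def Claim_equal_red_sort : Prop := ∀ (arr : List Int), Dom_red_sort arr → Spec_red_sort arr (red_sort arr)

-- ===== LEMMAS AND PROOFS =====

-- proof-only helper: the recursive form of pass 1 (what the stack loop computes range by range)
def pvQSOps : Nat → Int → Int → List Int × List (Int × Int) → List Int × List (Int × Int)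
  | 0, _, _, s => s
  | f + 1, low, high, s =>
    if low < high then
      let p := pvOpPartition low high s
      pvQSOps f (p.1 + 1) high (pvQSOps f low (p.1 - 1) p.2)
    else s

theorem pvSwap_apply (s : List Int × List (List Int)) (i j : Int) :
    pvSwap s i j = (pvApply s.1 (i, j), s.2 ++ [pvApply s.1 (i, j)]) := rfl

-- replay with an arbitrary running state
theorem replay_acc (ops : List (Int × Int)) : ∀ (a : List Int) (st : List (List Int)),
    ops.foldl (fun s p => (pvApply s.1 p, s.2 ++ [pvApply s.1 p])) (a, st) =
      ((pvReplay a ops).1, st ++ (pvReplay a ops).2) := by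
  induction ops with
  | nil => intro a st; simp [pvReplay]
  | cons p ops ih =>
    intro a st
    simp only [pvReplay, List.foldl_cons, List.nil_append]
    rw [ih (pvApply a p) (st ++ [pvApply a p]), ih (pvApply a p) [pvApply a p]]
    simp [pvReplay]

theorem replay_cons (a : List Int) (p : Int × Int) (ops : List (Int × Int)) :
    pvReplay a (p :: ops) =
      ((pvReplay (pvApply a p) ops).1, pvApply a p :: (pvReplay (pvApply a p) ops).2) := by
  simp only [pvReplay, List.foldl_cons, List.nil_append]
  rw [replay_acc ops (pvApply a p) [pvApply a p]]
  simp [pvReplay]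

theorem replay_append (a : List Int) (o1 o2 : List (Int × Int)) :
    pvReplay a (o1 ++ o2) =
      ((pvReplay (pvReplay a o1).1 o2).1,
       (pvReplay a o1).2 ++ (pvReplay (pvReplay a o1).1 o2).2) := by
  simp only [pvReplay, List.foldl_append]
  rw [replay_acc o2 (o1.foldl (fun s p => (pvApply s.1 p, s.2 ++ [pvApply s.1 p])) (a, [])).1]
  rfl

-- accumulator lemmas: the steps/ops component only ever receives appends
theorem partstep_acc (js : List Int) (pivot : Int) : ∀ (i : Int) (a : List Int) (st : List (List Int)),
    js.foldl (pvPartStep pivot) (i, (a, st)) =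
      ((js.foldl (pvPartStep pivot) (i, (a, []))).1,
       ((js.foldl (pvPartStep pivot) (i, (a, []))).2.1,
        st ++ (js.foldl (pvPartStep pivot) (i, (a, []))).2.2)) := by
  induction js with
  | nil => intro i a st; simp
  | cons j js ih =>
    intro i a st
    by_cases h : PySem.List.pyGetD a j 0 ≤ pivot
    · simp only [List.foldl_cons, pvPartStep, h, if_true, pvSwap_apply, List.nil_append]
      rw [ih (i + 1) (pvApply a (i + 1, j)) (st ++ [pvApply a (i + 1, j)]),
          ih (i + 1) (pvApply a (i + 1, j)) [pvApply a (i + 1, j)]]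
      simp
    · simp only [List.foldl_cons, pvPartStep, h, if_false]
      exact ih i a st

theorem opstep_acc (js : List Int) (pivot : Int) : ∀ (i : Int) (a : List Int) (δ : List (Int × Int)),
    js.foldl (pvOpStep pivot) (i, (a, δ)) =
      ((js.foldl (pvOpStep pivot) (i, (a, []))).1,
       ((js.foldl (pvOpStep pivot) (i, (a, []))).2.1,
        δ ++ (js.foldl (pvOpStep pivot) (i, (a, []))).2.2)) := by
  induction js with
  | nil => intro i a δ; simp
  | cons j js ih =>
    intro i a δ
    by_cases h : PySem.List.pyGetD a j 0 ≤ pivot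
    · simp only [List.foldl_cons, pvOpStep, h, if_true, List.nil_append]
      rw [ih (i + 1) (pvApply a (i + 1, j)) (δ ++ [(i + 1, j)]),
          ih (i + 1) (pvApply a (i + 1, j)) [(i + 1, j)]]
      simp
    · simp only [List.foldl_cons, pvOpStep, h, if_false]
      exact ih i a δ

-- simulation at the partition-loop level: A's fold is the replay of B's recorded ops
theorem fold_sim (js : List Int) (pivot : Int) : ∀ (i : Int) (a : List Int),
    js.foldl (pvPartStep pivot) (i, (a, [])) =
      ((js.foldl (pvOpStep pivot) (i, (a, []))).1,
       pvReplay a (js.foldl (pvOpStep pivot) (i, (a, []))).2.2) ∧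
    (js.foldl (pvOpStep pivot) (i, (a, []))).2.1 =
      (pvReplay a (js.foldl (pvOpStep pivot) (i, (a, []))).2.2).1 := by
  induction js with
  | nil => intro i a; simp [pvReplay]
  | cons j js ih =>
    intro i a
    by_cases h : PySem.List.pyGetD a j 0 ≤ pivot
    · simp only [List.foldl_cons, pvPartStep, pvOpStep, h, if_true, pvSwap_apply,
        List.nil_append]
      obtain ⟨ih1, ih2⟩ := ih (i + 1) (pvApply a (i + 1, j))
      rw [partstep_acc js pivot (i + 1) (pvApply a (i + 1, j)) [pvApply a (i + 1, j)],
          opstep_acc js pivot (i + 1) (pvApply a (i + 1, j)) [(i + 1, j)], ih1]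
      dsimp only
      simp only [List.singleton_append]
      rw [replay_cons a (i + 1, j)]
      exact ⟨rfl, ih2⟩
    · simp only [List.foldl_cons, pvPartStep, pvOpStep, h, if_false]
      exact ih i a

-- simulation at the partition level
theorem part_sim (low high : Int) (a : List Int) :
    pvPartition low high (a, []) =
      ((pvOpPartition low high (a, [])).1,
       pvReplay a (pvOpPartition low high (a, [])).2.2) ∧
    (pvOpPartition low high (a, [])).2.1 =
      (pvReplay a (pvOpPartition low high (a, [])).2.2).1 := by
  obtain ⟨h1, h2⟩ := fold_sim (PySem.List.pyRange low high 1) (PySem.List.pyGetD a high 0) (low - 1) a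
  simp only [pvPartition, pvOpPartition, h1, pvSwap_apply]
  set B := (PySem.List.pyRange low high 1).foldl
      (pvOpStep (PySem.List.pyGetD a high 0)) (low - 1, (a, [])) with hB
  rw [h2, replay_append a B.2.2 [(B.1 + 1, high)]]
  simp [pvReplay]

-- accumulator lemma for A's partition
theorem partition_acc (low high : Int) (a : List Int) (st : List (List Int)) :
    pvPartition low high (a, st) =
      ((pvPartition low high (a, [])).1,
       ((pvPartition low high (a, [])).2.1,
        st ++ (pvPartition low high (a, [])).2.2)) := by
  simp only [pvPartition, pvSwap_apply]
  rw [partstep_acc (PySem.List.pyRange low high 1) (PySem.List.pyGetD a high 0) (low - 1) a st]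
  simp

-- accumulator lemma for B's partition
theorem oppartition_acc (low high : Int) (a : List Int) (δ : List (Int × Int)) :
    pvOpPartition low high (a, δ) =
      ((pvOpPartition low high (a, [])).1,
       ((pvOpPartition low high (a, [])).2.1,
        δ ++ (pvOpPartition low high (a, [])).2.2)) := by
  simp only [pvOpPartition]
  rw [opstep_acc (PySem.List.pyRange low high 1) (PySem.List.pyGetD a high 0) (low - 1) a δ]
  simp

-- accumulator lemma for A's recursion
theorem qsA_acc_pair : ∀ (f : Nat) (low high : Int) (a : List Int) (st : List (List Int)),
    pvQS f low high (a, st) =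
      ((pvQS f low high (a, [])).1, st ++ (pvQS f low high (a, [])).2) := by
  intro f
  induction f with
  | zero => intro low high a st; simp [pvQS]
  | succ f ih =>
    intro low high a st
    by_cases h : low < high
    · simp only [pvQS, h, if_true]
      rw [partition_acc low high a st]
      set p := pvPartition low high (a, []) with hp
      rw [ih low (p.1 - 1) p.2.1 (st ++ p.2.2), ih low (p.1 - 1) p.2.1 p.2.2]
      set I := pvQS f low (p.1 - 1) (p.2.1, []) with hI
      rw [ih (p.1 + 1) high I.1 (st ++ p.2.2 ++ I.2), ih (p.1 + 1) high I.1 (p.2.2 ++ I.2)]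
      simp
    · simp [pvQS, h]

theorem qsA_acc (f : Nat) (low high : Int) (s : List Int × List (List Int)) :
    pvQS f low high s =
      ((pvQS f low high (s.1, [])).1, s.2 ++ (pvQS f low high (s.1, [])).2) := by
  obtain ⟨a, st⟩ := s
  exact qsA_acc_pair f low high a st

-- accumulator lemma for the recursive form of pass 1
theorem qsOps_acc_pair : ∀ (f : Nat) (low high : Int) (a : List Int) (δ : List (Int × Int)),
    pvQSOps f low high (a, δ) =
      ((pvQSOps f low high (a, [])).1, δ ++ (pvQSOps f low high (a, [])).2) := by
  intro f
  induction f with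
  | zero => intro low high a δ; simp [pvQSOps]
  | succ f ih =>
    intro low high a δ
    by_cases h : low < high
    · simp only [pvQSOps, h, if_true]
      rw [oppartition_acc low high a δ]
      set p := pvOpPartition low high (a, []) with hp
      rw [ih low (p.1 - 1) p.2.1 (δ ++ p.2.2), ih low (p.1 - 1) p.2.1 p.2.2]
      set I := pvQSOps f low (p.1 - 1) (p.2.1, []) with hI
      rw [ih (p.1 + 1) high I.1 (δ ++ p.2.2 ++ I.2), ih (p.1 + 1) high I.1 (p.2.2 ++ I.2)]
      simp
    · simp [pvQSOps, h]

theorem qsOps_acc (f : Nat) (low high : Int) (s : List Int × List (Int × Int)) :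
    pvQSOps f low high s =
      ((pvQSOps f low high (s.1, [])).1, s.2 ++ (pvQSOps f low high (s.1, [])).2) := by
  obtain ⟨a, δ⟩ := s
  exact qsOps_acc_pair f low high a δ

-- MAIN SIMULATION: A's quicksort-with-snapshots is the replay of pass 1's recorded ops
theorem qs_sim : ∀ (f : Nat) (low high : Int) (a : List Int),
    pvQS f low high (a, []) = pvReplay a (pvQSOps f low high (a, [])).2 ∧
    (pvQSOps f low high (a, [])).1 = (pvReplay a (pvQSOps f low high (a, [])).2).1 := by
  intro f
  induction f with
  | zero => intro low high a; simp [pvQS, pvQSOps, pvReplay]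
  | succ f ih =>
    intro low high a
    by_cases h : low < high
    · simp only [pvQS, pvQSOps, h, if_true]
      obtain ⟨hp1, hp2⟩ := part_sim low high a
      set pB := pvOpPartition low high (a, []) with hpB
      set a₁ := pB.2.1 with ha₁
      rw [hp1]
      dsimp only
      -- A side, inner call
      rw [qsA_acc f low (pB.1 - 1) (pvReplay a pB.2.2)]
      rw [← hp2]
      obtain ⟨hi1, hi2⟩ := ih low (pB.1 - 1) a₁
      set IB := pvQSOps f low (pB.1 - 1) (a₁, []) with hIB
      rw [hi1]
      -- A side, outer call
      rw [qsA_acc f (pB.1 + 1) high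
            ((pvReplay a₁ IB.2).1, (pvReplay a pB.2.2).2 ++ (pvReplay a₁ IB.2).2)]
      dsimp only
      obtain ⟨ho1, ho2⟩ := ih (pB.1 + 1) high (pvReplay a₁ IB.2).1
      set OB := pvQSOps f (pB.1 + 1) high ((pvReplay a₁ IB.2).1, []) with hOB
      rw [ho1]
      -- B side
      rw [qsOps_acc f low (pB.1 - 1) pB.2]
      rw [← ha₁, ← hIB]
      rw [qsOps_acc f (pB.1 + 1) high (IB.1, pB.2.2 ++ IB.2)]
      dsimp only
      rw [show pvQSOps f (pB.1 + 1) high (IB.1, []) = OB from by rw [hOB, hi2]]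
      -- replay of the concatenation
      have hra := replay_append a (pB.2.2 ++ IB.2) OB.2
      have hrb := replay_append a pB.2.2 IB.2
      rw [← hp2] at hrb
      constructor
      · rw [hra, hrb]
      · rw [hra, hrb]
        simpa using ho2
    · simp [pvQS, pvQSOps, h, pvReplay]

-- the i-component of B's partition loop grows by at most 1 per element and never decreases
theorem pvOpStep_foldl_bound (pivot : Int) (js : List Int) :
    ∀ (i0 : Int) (s : List Int × List (Int × Int)),
      i0 ≤ (js.foldl (pvOpStep pivot) (i0, s)).1 ∧
      (js.foldl (pvOpStep pivot) (i0, s)).1 ≤ i0 + js.length := by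
  induction js with
  | nil => intro i0 s; simp
  | cons j js ih =>
    intro i0 s
    simp only [List.foldl_cons, List.length_cons]
    by_cases h : PySem.List.pyGetD s.1 j 0 ≤ pivot
    · have := ih (i0 + 1) (pvApply s.1 (i0 + 1, j), s.2 ++ [(i0 + 1, j)])
      simp only [pvOpStep, h, if_true]
      constructor <;> omega
    · have := ih i0 s
      simp only [pvOpStep, h, if_false]
      constructor <;> omega

-- the returned pivot index lies in [low, high]
theorem pvOpPartition_bound (low high : Int) (s : List Int × List (Int × Int)) (h : low ≤ high) :
    low ≤ (pvOpPartition low high s).1 ∧ (pvOpPartition low high s).1 ≤ high := by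
  have hb := pvOpStep_foldl_bound (PySem.List.pyGetD s.1 high 0)
      (PySem.List.pyRange low high 1) (low - 1) s
  have hl : (PySem.List.pyRange low high 1).length = (high - low).toNat :=
    PySem.List.length_pyRange_one low high
  simp only [pvOpPartition]
  omega

theorem pvQSOps_not_lt (f : Nat) (low high : Int) (s : List Int × List (Int × Int))
    (h : ¬ low < high) : pvQSOps f low high s = s := by
  cases f <;> simp [pvQSOps, h]

-- fuel insensitivity of pvQSOps: any fuel ≥ size of the range gives the same result
theorem qsOps_fuel_eq : ∀ (n f f' : Nat) (low high : Int) (s : List Int × List (Int × Int)),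
    (high - low + 1).toNat ≤ n → (high - low + 1).toNat ≤ f → (high - low + 1).toNat ≤ f' →
    pvQSOps f low high s = pvQSOps f' low high s := by
  intro n
  induction n with
  | zero =>
    intro f f' low high s hn _ _
    have h : ¬ low < high := by omega
    rw [pvQSOps_not_lt f low high s h, pvQSOps_not_lt f' low high s h]
  | succ m ih =>
    intro f f' low high s hn hf hf'
    by_cases h : low < high
    · obtain ⟨a, rfl⟩ : ∃ a, f = a + 1 := ⟨f - 1, by omega⟩
      obtain ⟨b, rfl⟩ : ∃ b, f' = b + 1 := ⟨f' - 1, by omega⟩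
      simp only [pvQSOps, h, if_true]
      have hp := pvOpPartition_bound low high s (le_of_lt h)
      set p := pvOpPartition low high s with hpdef
      have h1 : ((p.1 - 1) - low + 1).toNat ≤ m := by omega
      have h2 : (high - (p.1 + 1) + 1).toNat ≤ m := by omega
      have hinner : pvQSOps a low (p.1 - 1) p.2 = pvQSOps b low (p.1 - 1) p.2 :=
        ih a b low (p.1 - 1) p.2 h1 (by omega) (by omega)
      rw [hinner]
      exact ih a b (p.1 + 1) high _ h2 (by omega) (by omega)
    · rw [pvQSOps_not_lt f low high s h, pvQSOps_not_lt f' low high s h]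

-- total fuel weight of a stack of ranges
def pvW (st : List (Int × Int)) : Nat :=
  (st.map (fun p => 2 * (p.2 - p.1 + 1).toNat + 1)).sum

-- the stack loop with enough fuel computes, left to right, the recursive pass 1 of each range
theorem oploop_eq_foldl : ∀ (n f : Nat) (st : List (Int × Int)) (s : List Int × List (Int × Int)),
    pvW st ≤ n → pvW st ≤ f →
    pvOpLoop f st s =
      st.foldl (fun s p => pvQSOps (p.2 - p.1 + 1).toNat p.1 p.2 s) s := by
  intro n
  induction n with
  | zero =>
    intro f st s hn _
    cases st with
    | nil => cases f <;> rfl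
    | cons p rest => simp [pvW] at hn
  | succ m ih =>
    intro f st s hn hf
    cases st with
    | nil => cases f <;> rfl
    | cons p rest =>
      obtain ⟨low, high⟩ := p
      have hw : pvW ((low, high) :: rest) = 2 * (high - low + 1).toNat + 1 + pvW rest := by
        simp [pvW]
      obtain ⟨g, rfl⟩ : ∃ g, f = g + 1 := ⟨f - 1, by omega⟩
      by_cases h : low < high
      · simp only [pvOpLoop, h, if_true]
        have hp := pvOpPartition_bound low high s (le_of_lt h)
        set q := pvOpPartition low high s with hqdef
        have hw' : pvW ((low, q.1 - 1) :: (q.1 + 1, high) :: rest) + 1 =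
            pvW ((low, high) :: rest) := by
          simp [pvW]; omega
        rw [ih g ((low, q.1 - 1) :: (q.1 + 1, high) :: rest) q.2 (by omega) (by omega)]
        simp only [List.foldl_cons]
        congr 1
        obtain ⟨k, hk⟩ : ∃ k, (high - low + 1).toNat = k + 1 := ⟨(high - low + 1).toNat - 1, by omega⟩
        rw [hk]
        simp only [pvQSOps, h, if_true, ← hqdef]
        have e1 : pvQSOps k low (q.1 - 1) q.2 = pvQSOps ((q.1 - 1 - low + 1).toNat) low (q.1 - 1) q.2 :=
          qsOps_fuel_eq k k _ low (q.1 - 1) q.2 (by omega) (by omega) (by omega)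
        rw [e1]
        exact qsOps_fuel_eq k ((high - (q.1 + 1) + 1).toNat) k (q.1 + 1) high _ (by omega) (by omega) (by omega)
      · simp only [pvOpLoop, h, if_false]
        rw [ih g rest s (by omega) (by omega)]
        simp only [List.foldl_cons]
        rw [pvQSOps_not_lt _ low high s h]

-- ===== VERDICT (by name: the statement is the Claim_ definition above) =====
theorem red_sort_spec : Claim_equal_red_sort := by
  intro arr _
  unfold Spec_red_sort red_sort red_sort_alt
  have hμ : ((arr.length : Int) - 1 - 0 + 1).toNat = arr.length := by omega
  rw [oploop_eq_foldl (2 * arr.length + 1) (2 * arr.length + 1) _ (arr, [])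
      (by simp [pvW]) (by simp [pvW])]
  simp only [List.foldl_cons, List.foldl_nil]
  rw [hμ]
  have hB : pvQSOps arr.length 0 ((arr.length : Int) - 1) (arr, []) =
      pvQSOps (arr.length + 1) 0 ((arr.length : Int) - 1) (arr, []) :=
    qsOps_fuel_eq (arr.length + 1) _ _ 0 _ (arr, []) (by omega) (by omega) (by omega)
  rw [hB]
  exact (qs_sim (arr.length + 1) 0 ((arr.length : Int) - 1) arr).1
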